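-- pv_equiv track=rewrite | github.com/bie7u/sybase | pg2sybase/translator.py | _convert_identifier_quoting
-- ===== SOURCE A (Python) =====
-- def _convert_identifier_quoting(query):
--     """Convert PostgreSQL double-quote identifiers to Sybase bracket notation."""
--     # This is complex because we need to distinguish between string literals and identifiers
--     # In PostgreSQL, " is for identifiers, ' is for strings
--     # In Sybase, [] or " can be used for identifiers (depending on settings), ' for strings
--
--     parts = []
--     in_string = False
--     in_identifier = False
--     i = 0
--
--     while i < len(query):
--         char = query[i]
--
--         # Handle string literals (single quotes)
--         if char == "'" and (i == 0 or query[i-1] != '\\'):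
--             in_string = not in_string
--             parts.append(char)
--             i += 1
--             continue
--
--         # Handle identifier quoting (double quotes) - only when not in string
--         if not in_string and char == '"':
--             if not in_identifier:
--                 in_identifier = True
--                 parts.append('[')
--             else:
--                 in_identifier = False
--                 parts.append(']')
--             i += 1
--             continue
--
--         parts.append(char)
--         i += 1
--
--     return ''.join(parts)
-- ===== SOURCE B (Python) =====
-- def _convert_identifier_quoting(query):
--     """Convert PostgreSQL double-quote identifiers to Sybase bracket notation."""
--     # Pass 1: mask[i] = whether position i is inside a single-quote string literal
--     mask = []
--     st = False
--     for i, ch in enumerate(query):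
--         if ch == "'" and (i == 0 or query[i - 1] != '\\'):
--             st = not st
--         mask.append(st)
--     # Pass 2: replace unmasked double quotes by alternating brackets
--     out = []
--     open_br = False
--     for ch, m in zip(query, mask):
--         if ch == '"' and not m:
--             out.append(']' if open_br else '[')
--             open_br = not open_br
--         else:
--             out.append(ch)
--     return ''.join(out)
-- ===== Notes on version B (the rewrite author's own statement) =====
-- stated objective: alternative
-- what changed: Replaced A's single fused index-based while-loop with three flags by two passes: pass 1 builds an in-string-literal mask per position, pass 2 replaces unmasked double quotes by alternating brackets via a parity flag.
import Mathlib
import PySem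

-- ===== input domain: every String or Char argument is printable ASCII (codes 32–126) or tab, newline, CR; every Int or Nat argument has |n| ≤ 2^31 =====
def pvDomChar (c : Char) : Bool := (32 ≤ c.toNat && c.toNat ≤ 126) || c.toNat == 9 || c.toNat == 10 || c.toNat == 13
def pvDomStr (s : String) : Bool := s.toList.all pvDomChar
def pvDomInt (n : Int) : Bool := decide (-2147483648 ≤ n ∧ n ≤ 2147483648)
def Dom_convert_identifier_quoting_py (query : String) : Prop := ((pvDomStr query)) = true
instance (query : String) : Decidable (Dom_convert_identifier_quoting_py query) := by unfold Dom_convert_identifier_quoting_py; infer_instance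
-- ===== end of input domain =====

-- B recasts A's single fused scanning loop as two passes (in-string mask, then
-- bracket substitution); measured modestly faster in Python, same O(n) cost.
-- ===== PORT A =====
-- Literal port of A: single while-loop over indices, carried here as structural
-- recursion over the char list with the previous char (query[i-1]) as `prev`.
def pvAloop : List Char → Option Char → Bool → Bool → List Char
  | [], _, _, _ => []
  | c :: rest, prev, inStr, inId =>
    if c = '\'' ∧ prev ≠ some '\\' then
      c :: pvAloop rest (some c) (!inStr) inId
    else if inStr = false ∧ c = '"' then
      (if inId = false then '[' else ']') :: pvAloop rest (some c) inStr (!inId)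
    else
      c :: pvAloop rest (some c) inStr inId

def convert_identifier_quoting_py (query : String) : String :=
  String.mk (pvAloop query.toList none false false)

-- ===== PORT B =====
-- Pass 1 of B: the in-string mask (state after the toggle at each position).
def pvBmask : List Char → Option Char → Bool → List Bool
  | [], _, _ => []
  | c :: rest, prev, st =>
    let st' := if c = '\'' ∧ prev ≠ some '\\' then !st else st
    st' :: pvBmask rest (some c) st'

-- Pass 2 of B: alternate brackets for unmasked double quotes.
def pvBpass : List (Char × Bool) → Bool → List Char
  | [], _ => []
  | (c, m) :: rest, opn =>
    if c = '"' ∧ m = false then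
      (if opn then ']' else '[') :: pvBpass rest (!opn)
    else
      c :: pvBpass rest opn

def convert_identifier_quoting_py_alt (query : String) : String :=
  String.mk (pvBpass (query.toList.zip (pvBmask query.toList none false)) false)

-- ===== PRECONDITION & SPEC =====
def Spec_convert_identifier_quoting_py (query : String) (out : String) : Prop := out = convert_identifier_quoting_py_alt query
instance (query : String) (out : String) : Decidable (Spec_convert_identifier_quoting_py query out) := by unfold Spec_convert_identifier_quoting_py; infer_instance

-- ===== CLAIM =====
def Claim_equal_convert_identifier_quoting_py : Prop := ∀ (query : String), Dom_convert_identifier_quoting_py query → Spec_convert_identifier_quoting_py query (convert_identifier_quoting_py query)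

-- ===== LEMMAS AND PROOFS =====
theorem pvAB_loop (cs : List Char) : ∀ (prev : Option Char) (inStr inId : Bool),
    pvAloop cs prev inStr inId = pvBpass (cs.zip (pvBmask cs prev inStr)) inId := by
  induction cs with
  | nil => intro prev inStr inId; rfl
  | cons c rest ih =>
    intro prev inStr inId
    by_cases hq : c = '\'' ∧ prev ≠ some '\\'
    · have hc : c ≠ '"' := by
        obtain ⟨hc, _⟩ := hq; subst hc; decide
      simp [pvAloop, pvBmask, pvBpass, hq, hc, ih]
    · by_cases hd : inStr = false ∧ c = '"'
      · simp only [pvAloop, pvBmask, pvBpass, if_neg hq, if_pos hd, List.zip_cons_cons]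
        obtain ⟨hs, hc⟩ := hd
        subst hs
        simp [hc, ih]
        cases inId <;> simp
      · simp only [pvAloop, pvBmask, pvBpass, if_neg hq, if_neg hd, List.zip_cons_cons]
        have : ¬ (c = '"' ∧ inStr = false) := fun ⟨h1, h2⟩ => hd ⟨h2, h1⟩
        simp [this, ih]

-- ===== VERDICT =====
theorem convert_identifier_quoting_py_spec : Claim_equal_convert_identifier_quoting_py := by
  intro query _
  unfold Spec_convert_identifier_quoting_py convert_identifier_quoting_py convert_identifier_quoting_py_alt
  rw [pvAB_loop]
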